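-- pv_equiv track=rewrite | github.com/kush018/Telecaster | tictactoe/tree.py | get_rotated_index
-- ===== SOURCE A (Python) =====
-- def get_rotated_index(i: int, rot: int) -> int:
--     """
--     0 1 2 - rot 0/4
--     3 4 5
--     6 7 8
--
--     6 3 0 - rot 1
--     7 4 1
--     8 5 2
--
--     8 7 6 - rot 2
--     5 4 3
--     2 1 0
--
--     2 5 8 - rot 3
--     1 4 7
--     0 3 6
--     """
--     if rot == 0:
--         return i
--     elif rot == 1:
--         return [6, 3, 0, 7, 4, 1, 8, 5, 2][i]
--     elif rot == 2:
--         return [8, 7, 6, 5, 4, 3, 2, 1, 0][i]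
--     elif rot == 3:
--         return [2, 5, 8, 1, 4, 7, 0, 3, 6][i]
--     else:
--         return get_rotated_index(i, rot % 4)
-- ===== SOURCE B (Python) =====
-- def get_rotated_index(i: int, rot: int) -> int:
--     # Apply the single 90-degree permutation (rot % 4) times instead of four tables + recursion.
--     perm = [6, 3, 0, 7, 4, 1, 8, 5, 2]
--     r = i
--     for _ in range(rot % 4):
--         r = perm[r]
--     return r
-- ===== Notes on version B (the rewrite author's own statement) =====
-- stated objective: simpler
-- what changed: Replaced the four hardcoded rotation tables plus tail recursion by one base 90-degree permutation applied rot % 4 times in a loop.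
import Mathlib
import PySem

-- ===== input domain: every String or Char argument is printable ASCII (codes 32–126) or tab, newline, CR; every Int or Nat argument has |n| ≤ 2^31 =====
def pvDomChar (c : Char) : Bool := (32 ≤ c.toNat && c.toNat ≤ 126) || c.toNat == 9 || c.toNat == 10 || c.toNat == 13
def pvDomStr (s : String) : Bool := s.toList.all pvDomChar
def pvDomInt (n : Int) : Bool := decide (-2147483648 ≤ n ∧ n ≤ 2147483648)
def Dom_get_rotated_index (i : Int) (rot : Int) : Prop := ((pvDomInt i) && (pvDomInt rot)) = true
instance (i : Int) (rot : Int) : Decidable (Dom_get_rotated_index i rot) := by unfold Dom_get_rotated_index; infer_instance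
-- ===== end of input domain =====

-- B replaces the four hardcoded rotation tables and the recursion by one base 90° permutation applied rot % 4 times (simpler decomposition).

-- ===== PORT A =====
def get_rotated_index (i : Int) (rot : Int) : Int :=
  if rot = 0 then i
  else if rot = 1 then PySem.List.pyGetD [6, 3, 0, 7, 4, 1, 8, 5, 2] i 0
  else if rot = 2 then PySem.List.pyGetD [8, 7, 6, 5, 4, 3, 2, 1, 0] i 0
  else if rot = 3 then PySem.List.pyGetD [2, 5, 8, 1, 4, 7, 0, 3, 6] i 0
  else get_rotated_index i (PySem.Int.mod rot 4)
termination_by (if 0 ≤ rot ∧ rot < 4 then 0 else 1 : Nat)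
decreasing_by
  have hm : 0 ≤ PySem.Int.mod rot 4 ∧ PySem.Int.mod rot 4 < 4 := by
    rw [PySem.Int.mod_eq_emod_of_pos (by norm_num)]; omega
  simp only [if_pos hm]
  split <;> omega

-- ===== PORT B =====
def get_rotated_index_alt (i : Int) (rot : Int) : Int :=
  (List.range (PySem.Int.mod rot 4).toNat).foldl
    (fun r _ => PySem.List.pyGetD [6, 3, 0, 7, 4, 1, 8, 5, 2] r 0) i

-- ===== PRECONDITION & SPEC =====
-- Pre_ excludes exactly the inputs where Python A raises IndexError: an effective
-- rotation (rot % 4 ≠ 0) together with an index outside the list range [-9, 8].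
def Pre_get_rotated_index (i : Int) (rot : Int) : Prop :=
  PySem.Int.mod rot 4 = 0 ∨ (-9 ≤ i ∧ i ≤ 8)
instance (i : Int) (rot : Int) : Decidable (Pre_get_rotated_index i rot) := by
  unfold Pre_get_rotated_index; infer_instance
def pvWitness_get_rotated_index : Int × Int := (5, 7)

def Spec_get_rotated_index (i : Int) (rot : Int) (out : Int) : Prop := out = get_rotated_index_alt i rot
instance (i : Int) (rot : Int) (out : Int) : Decidable (Spec_get_rotated_index i rot out) := by unfold Spec_get_rotated_index; infer_instance

-- ===== CLAIM (what is proved, stated in full; the proofs are below) =====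
def Claim_equal_get_rotated_index : Prop := ∀ (i : Int) (rot : Int), Dom_get_rotated_index i rot → Pre_get_rotated_index i rot → Spec_get_rotated_index i rot (get_rotated_index i rot)

-- ===== LEMMAS AND PROOFS =====

-- one-step unfolding equation for A's well-founded recursion
lemma a_unfold (i rot : Int) : get_rotated_index i rot =
    if rot = 0 then i
    else if rot = 1 then PySem.List.pyGetD [6, 3, 0, 7, 4, 1, 8, 5, 2] i 0
    else if rot = 2 then PySem.List.pyGetD [8, 7, 6, 5, 4, 3, 2, 1, 0] i 0
    else if rot = 3 then PySem.List.pyGetD [2, 5, 8, 1, 4, 7, 0, 3, 6] i 0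
    else get_rotated_index i (PySem.Int.mod rot 4) := by
  rw [get_rotated_index.eq_def]

-- A at an effective rotation r ∈ {1,2,3} equals B at that rotation, for every in-range index.
lemma base_eq (i : Int) (hlo : -9 ≤ i) (hhi : i ≤ 8) (r : Int) (hr : r = 1 ∨ r = 2 ∨ r = 3) :
    get_rotated_index i r = get_rotated_index_alt i r := by
  rcases hr with h | h | h <;> subst h <;> rw [a_unfold] <;> interval_cases i <;> decide

-- A reduces the general rotation to rot % 4 by its (depth-one) recursion.
lemma a_mod (i rot : Int) : get_rotated_index i rot = get_rotated_index i (PySem.Int.mod rot 4) := by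
  by_cases h0 : rot = 0
  · subst h0; rfl
  · by_cases h1 : rot = 1
    · subst h1; rfl
    · by_cases h2 : rot = 2
      · subst h2; rfl
      · by_cases h3 : rot = 3
        · subst h3; rfl
        · rw [a_unfold]
          simp [h0, h1, h2, h3]

-- B depends on rot only through rot % 4.
lemma b_mod (i rot : Int) : get_rotated_index_alt i rot = get_rotated_index_alt i (PySem.Int.mod rot 4) := by
  unfold get_rotated_index_alt
  have : PySem.Int.mod (PySem.Int.mod rot 4) 4 = PySem.Int.mod rot 4 := by
    rw [PySem.Int.mod_eq_emod_of_pos (by omega), PySem.Int.mod_eq_emod_of_pos (by omega)]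
    omega
  rw [this]

-- ===== VERDICT (by name: the statement is the Claim_ definition above) =====
theorem get_rotated_index_spec : Claim_equal_get_rotated_index := by
  intro i rot _ hpre
  unfold Spec_get_rotated_index
  rw [a_mod, b_mod]
  have hm : PySem.Int.mod rot 4 = 0 ∨ PySem.Int.mod rot 4 = 1 ∨
      PySem.Int.mod rot 4 = 2 ∨ PySem.Int.mod rot 4 = 3 := by
    rw [PySem.Int.mod_eq_emod_of_pos (by omega)]; omega
  rcases hm with h | h
  · rw [h, a_unfold]
    simp [get_rotated_index_alt]
  · rcases hpre with hp | ⟨hlo, hhi⟩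
    · rcases h with h | h | h <;> rw [hp] at h <;> omega
    · rw [base_eq i hlo hhi _ h]
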